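-- pv_equiv track=rewrite | github.com/jyan500/resume-parser | server/utils/models.py | _create_entity_pattern_tokens
-- ===== SOURCE A (Python) =====
-- def _create_entity_pattern_tokens(word):
--     """
--     to tokenize words like "career development",
--     or "self-employed", and making sure each part is lowercase,
--     first split by spaces
--     then if there's a hyphen, split by that to apply
--     lowercase on each section
--     """
--     tokens = []
--     for segment in word.split(" "):
--         parts = segment.split("-")
--         for i, part in enumerate(parts):
--             tokens.append({"LOWER": part})
--             if i < len(parts) - 1:
--                 tokens.append({"LOWER": "-"})
--     return tokens
-- ===== SOURCE B (Python) =====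
-- def _create_entity_pattern_tokens(word):
--     """Single-pass character scanner: one accumulator, no split calls."""
--     tokens = []
--     current = ""
--     for ch in word:
--         if ch == " ":
--             tokens.append({"LOWER": current})
--             current = ""
--         elif ch == "-":
--             tokens.append({"LOWER": current})
--             tokens.append({"LOWER": "-"})
--             current = ""
--         else:
--             current += ch
--     tokens.append({"LOWER": current})
--     return tokens
-- ===== Notes on version B (the rewrite author's own statement) =====
-- stated objective: alternative
-- what changed: Replaced the two nested split-and-enumerate passes with a single left-to-right character scan that flushes an accumulator on space/hyphen, building the token stream in one pass with no intermediate segment lists.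
import Mathlib
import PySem

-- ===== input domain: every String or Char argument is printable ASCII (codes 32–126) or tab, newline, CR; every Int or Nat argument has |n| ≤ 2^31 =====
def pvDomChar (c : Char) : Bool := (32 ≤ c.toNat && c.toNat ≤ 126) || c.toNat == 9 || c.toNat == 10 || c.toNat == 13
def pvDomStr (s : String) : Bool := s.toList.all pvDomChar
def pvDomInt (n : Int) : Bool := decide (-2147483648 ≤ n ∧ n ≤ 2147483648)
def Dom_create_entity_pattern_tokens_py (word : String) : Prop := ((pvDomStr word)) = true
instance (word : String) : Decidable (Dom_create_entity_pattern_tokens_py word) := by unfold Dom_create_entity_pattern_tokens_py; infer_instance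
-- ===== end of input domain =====

-- B replaces A's nested split/enumerate passes with a single-pass character scanner (alternative decomposition, same cost).

-- ===== PORT A =====
-- word.split(" ") / segment.split("-"): separators are nonempty literals, so Python never raises;
-- PySem.Chars.splitOn is the exact sep ≠ "" form of str.split.
def create_entity_pattern_tokens_py (word : String) : List (List (String × String)) :=
  (PySem.Chars.splitOn word.toList " ".toList).foldl (fun tokens segment =>
    let parts := PySem.Chars.splitOn segment "-".toList
    (PySem.List.enumerate parts).foldl (fun tokens ip =>
      let tokens := tokens ++ [[("LOWER", String.ofList ip.2)]]
      if ip.1 < (parts.length : Int) - 1 then tokens ++ [[("LOWER", "-")]] else tokens)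
      tokens) []

-- ===== PORT B =====
-- single pass over the characters of word, with a `current` accumulator (current += ch → cur ++ [c])
def create_entity_pattern_tokens_py_alt (word : String) : List (List (String × String)) :=
  let st := word.toList.foldl
    (fun (st : List (List (String × String)) × List Char) c =>
      if c = ' ' then (st.1 ++ [[("LOWER", String.ofList st.2)]], [])
      else if c = '-' then (st.1 ++ [[("LOWER", String.ofList st.2)]] ++ [[("LOWER", "-")]], [])
      else (st.1, st.2 ++ [c]))
    ([], [])
  st.1 ++ [[("LOWER", String.ofList st.2)]]

-- ===== PRECONDITION & SPEC =====
def Spec_create_entity_pattern_tokens_py (word : String) (out : List (List (String × String))) : Prop := out = create_entity_pattern_tokens_py_alt word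
instance (word : String) (out : List (List (String × String))) : Decidable (Spec_create_entity_pattern_tokens_py word out) := by unfold Spec_create_entity_pattern_tokens_py; infer_instance

-- ===== CLAIM (what is proved, stated in full; the proofs are below) =====
def Claim_equal_create_entity_pattern_tokens_py : Prop := ∀ (word : String), Dom_create_entity_pattern_tokens_py word → Spec_create_entity_pattern_tokens_py word (create_entity_pattern_tokens_py word)

-- ===== LEMMAS AND PROOFS =====

-- prepend a prefix to the first block of a block list
def consH {α : Type} (p : List α) : List (List α) → List (List α)
  | [] => [p]
  | x :: xs => (p ++ x) :: xs

-- reference single-character split (what Python's s.split(d) computes for a 1-char d)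
def splitC (d : Char) : List Char → List (List Char)
  | [] => [[]]
  | c :: cs => if c = d then [] :: splitC d cs else consH [c] (splitC d cs)

lemma splitC_ne_nil (d : Char) (cs : List Char) : splitC d cs ≠ [] := by
  cases cs with
  | nil => simp [splitC]
  | cons c cs =>
    simp only [splitC]
    split
    · simp
    · cases h : splitC d cs <;> simp [consH]

lemma consH_nil_of_ne {α : Type} (l : List (List α)) (h : l ≠ []) : consH [] l = l := by
  cases l with
  | nil => exact absurd rfl h
  | cons x xs => simp [consH]

lemma consH_consH {α : Type} (a b : List α) (l : List (List α)) :
    consH a (consH b l) = consH (a ++ b) l := by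
  cases l <;> simp [consH]

lemma splitOn_go_eq (d : Char) :
    ∀ (fuel : Nat) (l cur : List Char) (acc : List (List Char)), l.length < fuel →
      PySem.Chars.splitOn.go [d] fuel l cur acc =
        acc.reverse ++ consH cur.reverse (splitC d l) := by
  intro fuel
  induction fuel with
  | zero => intro l cur acc h; omega
  | succ fuel ih =>
    intro l cur acc h
    cases l with
    | nil => simp [PySem.Chars.splitOn.go, splitC, consH]
    | cons c rest =>
      rw [PySem.Chars.splitOn.go]
      by_cases hc : c = d
      · have hp : List.isPrefixOf [d] (c :: rest) = true := by
          simp [List.isPrefixOf, hc]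
        rw [if_pos hp]
        simp only [List.length_cons] at h
        rw [ih _ _ _ (by simpa using Nat.lt_of_succ_lt_succ h)]
        cases hsr : splitC d rest with
        | nil => exact absurd hsr (splitC_ne_nil d rest)
        | cons a as => simp [splitC, hc, consH, hsr]
      · have hp : List.isPrefixOf [d] (c :: rest) = false := by
          simp [List.isPrefixOf]
          exact fun h' => absurd h'.symm hc
        rw [if_neg (by simp [hp])]
        simp only [List.length_cons] at h
        rw [ih _ _ _ (Nat.lt_of_succ_lt_succ h)]
        simp [splitC, hc, consH_consH]

lemma splitOn_single (d : Char) (s : List Char) :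
    PySem.Chars.splitOn s [d] = splitC d s := by
  unfold PySem.Chars.splitOn
  rw [splitOn_go_eq d (s.length + 1) s [] [] (by omega)]
  simp [consH_nil_of_ne _ (splitC_ne_nil d s)]

-- abbreviations for the token constructors
def tok (p : List Char) : List (String × String) := [("LOWER", String.ofList p)]
def hyphTok : List (String × String) := [("LOWER", "-")]

-- the shared intermediate: the list of token contents, hyphen tokens written as ['-']
def H (cs : List Char) : List (List Char) :=
  (splitC ' ' cs).flatMap (fun seg => List.intersperse ['-'] (splitC '-' seg))

lemma intersperse_ne_nil {α : Type} (sep : List α) (l : List (List α)) (h : l ≠ []) :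
    List.intersperse sep l ≠ [] := by
  cases l with
  | nil => exact absurd rfl h
  | cons x xs => cases xs <;> simp [List.intersperse]

lemma intersperse_consH {α : Type} (sep a : List α) (x : List α) (xs : List (List α)) :
    List.intersperse sep (consH a (x :: xs)) = consH a (List.intersperse sep (x :: xs)) := by
  cases xs <;> simp [List.intersperse, consH]

lemma consH_append {α : Type} (a : List α) (l m : List (List α)) (h : l ≠ []) :
    consH a (l ++ m) = consH a l ++ m := by
  cases l with
  | nil => exact absurd rfl h
  | cons x xs => simp [consH]

lemma H_ne_nil (cs : List Char) : H cs ≠ [] := by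
  unfold H
  cases h : splitC ' ' cs with
  | nil => exact absurd h (splitC_ne_nil ' ' cs)
  | cons s rest =>
    simp only [List.flatMap_cons]
    intro hne
    rcases List.append_eq_nil_iff.mp hne with ⟨h1, _⟩
    exact intersperse_ne_nil _ _ (splitC_ne_nil '-' s) h1

lemma H_nil : H [] = [[]] := by simp [H, splitC]

lemma H_space (cs : List Char) : H (' ' :: cs) = [] :: H cs := by
  simp [H, splitC]

lemma H_cons_of_ne (c : Char) (cs : List Char) (hc : c ≠ ' ') :
    H (c :: cs) = if c = '-' then [] :: ['-'] :: H cs else consH [c] (H cs) := by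
  unfold H
  cases h : splitC ' ' cs with
  | nil => exact absurd h (splitC_ne_nil ' ' cs)
  | cons s rest =>
    have hsplit : splitC ' ' (c :: cs) = (c :: s) :: rest := by
      simp [splitC, hc, h, consH]
    rw [hsplit, List.flatMap_cons, List.flatMap_cons]
    by_cases hd : c = '-'
    · subst hd
      rw [if_pos rfl]
      have hc2 : splitC '-' ('-' :: s) = [] :: splitC '-' s := by simp [splitC]
      rw [hc2]
      cases h2 : splitC '-' s with
      | nil => exact absurd h2 (splitC_ne_nil '-' s)
      | cons p pr => simp [List.intersperse]
    · rw [if_neg hd]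
      have hc2 : splitC '-' (c :: s) = consH [c] (splitC '-' s) := by simp [splitC, hd]
      rw [hc2]
      cases h2 : splitC '-' s with
      | nil => exact absurd h2 (splitC_ne_nil '-' s)
      | cons p pr =>
        rw [intersperse_consH]
        rw [consH_append _ _ _ (intersperse_ne_nil _ _ (List.cons_ne_nil p pr))]

lemma H_hyph (cs : List Char) : H ('-' :: cs) = [] :: ['-'] :: H cs := by
  rw [H_cons_of_ne '-' cs (by decide)]; simp

lemma H_other (c : Char) (cs : List Char) (h1 : c ≠ ' ') (h2 : c ≠ '-') :
    H (c :: cs) = consH [c] (H cs) := by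
  rw [H_cons_of_ne c cs h1, if_neg h2]

-- B's scan, characterized against H
lemma b_scan (cs : List Char) : ∀ (toks : List (List (String × String))) (cur : List Char),
    (let st := cs.foldl
        (fun (st : List (List (String × String)) × List Char) c =>
          if c = ' ' then (st.1 ++ [[("LOWER", String.ofList st.2)]], [])
          else if c = '-' then (st.1 ++ [[("LOWER", String.ofList st.2)]] ++ [[("LOWER", "-")]], [])
          else (st.1, st.2 ++ [c]))
        (toks, cur)
     st.1 ++ [[("LOWER", String.ofList st.2)]])
      = toks ++ (consH cur (H cs)).map tok := by
  induction cs with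
  | nil => intro toks cur; simp [H_nil, consH, tok]
  | cons c cs ih =>
    intro toks cur
    simp only [List.foldl_cons]
    by_cases h1 : c = ' '
    · subst h1
      rw [if_pos rfl]
      rw [ih]
      rw [H_space, consH_nil_of_ne _ (H_ne_nil cs)]
      simp [consH, tok]
    · by_cases h2 : c = '-'
      · subst h2
        rw [if_neg (by decide), if_pos rfl]
        rw [ih]
        rw [H_hyph, consH_nil_of_ne _ (H_ne_nil cs)]
        simp [consH, tok]
      · rw [if_neg h1, if_neg h2]
        rw [ih]
        rw [H_other c cs h1 h2, consH_consH]

-- A's inner enumerate-fold inserts a hyphen token after every part but the last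
lemma a_inner (n : Int) :
    ∀ (ps : List (List Char)) (s : Int) (toks : List (List (String × String))),
      s + ps.length = n →
      (PySem.List.enumerate ps s).foldl (fun tokens ip =>
          let tokens := tokens ++ [[("LOWER", String.ofList ip.2)]]
          if ip.1 < n - 1 then tokens ++ [[("LOWER", "-")]] else tokens) toks
        = toks ++ List.intersperse hyphTok (ps.map tok) := by
  intro ps
  induction ps with
  | nil => intro s toks _; simp [PySem.List.enumerate_nil]
  | cons p pr ih =>
    intro s toks hn
    rw [PySem.List.enumerate_cons]
    simp only [List.foldl_cons]
    cases pr with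
    | nil =>
      simp only [List.length_cons, List.length_nil] at hn
      rw [if_neg (by omega)]
      simp [PySem.List.enumerate_nil, tok]
    | cons q qr =>
      have hlt : s < n - 1 := by
        simp only [List.length_cons] at hn
        omega
      rw [if_pos hlt]
      rw [ih (s + 1) _ (by simp only [List.length_cons] at hn ⊢; push_cast at hn ⊢; omega)]
      simp [tok, hyphTok]

-- A equals map tok ∘ H
lemma map_intersperse_tok {α β : Type} (f : α → β) (s : α) :
    ∀ l : List α, List.map f (List.intersperse s l) = List.intersperse (f s) (List.map f l)
  | [] => rfl
  | [_] => rfl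
  | x :: y :: xs => by
    simp only [List.intersperse, List.map_cons]
    rw [map_intersperse_tok f s (y :: xs)]
    simp

lemma a_eq_H (word : String) :
    create_entity_pattern_tokens_py word = (H word.toList).map tok := by
  unfold create_entity_pattern_tokens_py
  have hsp : " ".toList = [' '] := by decide
  have hhy : "-".toList = ['-'] := by decide
  rw [hsp, hhy, splitOn_single]
  have hseg : ∀ (seg : List Char) (toks : List (List (String × String))),
      (PySem.List.enumerate (PySem.Chars.splitOn seg ['-'])).foldl (fun tokens ip =>
          let tokens := tokens ++ [[("LOWER", String.ofList ip.2)]]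
          if ip.1 < ((PySem.Chars.splitOn seg ['-']).length : Int) - 1 then
            tokens ++ [[("LOWER", "-")]] else tokens) toks
        = toks ++ List.intersperse hyphTok ((splitC '-' seg).map tok) := by
    intro seg toks
    rw [splitOn_single]
    exact a_inner ((splitC '-' seg).length : Int) (splitC '-' seg) 0 toks (by omega)
  rw [H, List.map_flatMap]
  induction (splitC ' ' word.toList) with
  | nil => simp
  | cons s rest ihr =>
    rw [List.foldl_cons, List.flatMap_cons]
    have step : ∀ (init : List (List (String × String))),
        (s :: rest).foldl (fun tokens segment =>
          (PySem.List.enumerate (PySem.Chars.splitOn segment ['-'])).foldl (fun tokens ip =>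
            let tokens := tokens ++ [[("LOWER", String.ofList ip.2)]]
            if ip.1 < ((PySem.Chars.splitOn segment ['-']).length : Int) - 1 then
              tokens ++ [[("LOWER", "-")]] else tokens) tokens) init
          = init ++ (s :: rest).flatMap
              (fun seg => List.map tok (List.intersperse ['-'] (splitC '-' seg))) := by
      clear ihr
      induction (s :: rest) with
      | nil => intro init; simp
      | cons u ur ihu =>
        intro init
        rw [List.foldl_cons, List.flatMap_cons, hseg, ihu]
        rw [map_intersperse_tok]
        have : tok ['-'] = hyphTok := by decide
        rw [this, List.append_assoc]
    have := step []
    simpa using this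

-- B equals map tok ∘ H
lemma b_eq_H (word : String) :
    create_entity_pattern_tokens_py_alt word = (H word.toList).map tok := by
  unfold create_entity_pattern_tokens_py_alt
  have := b_scan word.toList [] []
  simp only at this
  rw [this]
  simp [consH_nil_of_ne _ (H_ne_nil word.toList)]

-- ===== VERDICT (by name: the statement is the Claim_ definition above) =====
theorem create_entity_pattern_tokens_py_spec : Claim_equal_create_entity_pattern_tokens_py := by
  intro word _
  unfold Spec_create_entity_pattern_tokens_py
  rw [a_eq_H, b_eq_H]
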